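-- pv_equiv track=rewrite | github.com/VITAMIN-organisation/vitamin-model-checker | model_checker/benchmarking/runner.py | _extract_formula_features
-- ===== SOURCE A (Python) =====
-- def _extract_formula_features(formula: str) -> dict[str, int]:
--     cleaned = formula.replace(" ", "").upper()
--     paren_depth = 0
--     max_paren_depth = 0
--     for char in cleaned:
--         if char == "(":
--             paren_depth += 1
--             max_paren_depth = max(max_paren_depth, paren_depth)
--         elif char == ")":
--             paren_depth = max(paren_depth - 1, 0)
--     return {
--         "token_length": len(cleaned),
--         "count_X": cleaned.count("X"),
--         "count_F": cleaned.count("F"),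
--         "count_G": cleaned.count("G"),
--         "count_U": cleaned.count("U"),
--         "count_R": cleaned.count("R"),
--         "coalition_markers": cleaned.count("<"),
--         "max_paren_depth": max_paren_depth,
--     }
-- ===== SOURCE B (Python) =====
-- def _extract_formula_features(formula: str) -> dict[str, int]:
--     cleaned = formula.replace(" ", "").upper()
--     n_x = n_f = n_g = n_u = n_r = n_coal = 0
--     depth = 0
--     max_depth = 0
--     for ch in cleaned:
--         if ch == "X":
--             n_x += 1
--         elif ch == "F":
--             n_f += 1
--         elif ch == "G":
--             n_g += 1
--         elif ch == "U":
--             n_u += 1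
--         elif ch == "R":
--             n_r += 1
--         elif ch == "<":
--             n_coal += 1
--         elif ch == "(":
--             depth += 1
--             if depth > max_depth:
--                 max_depth = depth
--         elif ch == ")":
--             depth = depth - 1 if depth > 0 else 0
--     return {
--         "token_length": len(cleaned),
--         "count_X": n_x,
--         "count_F": n_f,
--         "count_G": n_g,
--         "count_U": n_u,
--         "count_R": n_r,
--         "coalition_markers": n_coal,
--         "max_paren_depth": max_depth,
--     }
-- ===== Notes on version B (the rewrite author's own statement) =====
-- stated objective: alternative
-- what changed: One single pass over the cleaned string tallies the six operator counters together with the paren-depth tracking, replacing A's separate depth loop plus six full-string .count() scans.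
import Mathlib
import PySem

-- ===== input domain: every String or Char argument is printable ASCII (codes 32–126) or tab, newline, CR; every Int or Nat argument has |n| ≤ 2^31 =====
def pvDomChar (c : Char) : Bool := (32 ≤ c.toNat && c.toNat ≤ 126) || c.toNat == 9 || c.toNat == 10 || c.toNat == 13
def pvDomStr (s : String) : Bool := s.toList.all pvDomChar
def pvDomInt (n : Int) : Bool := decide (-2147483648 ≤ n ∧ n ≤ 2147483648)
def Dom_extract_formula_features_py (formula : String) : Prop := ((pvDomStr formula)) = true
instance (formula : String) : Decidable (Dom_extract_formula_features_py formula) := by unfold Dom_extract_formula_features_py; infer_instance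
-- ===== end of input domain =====

-- B makes one single pass over the cleaned string, tallying the six operator counters together
-- with the paren-depth tracking, instead of A's separate depth loop plus six full-string .count() scans (objective: alternative).


-- ===== PORT A =====
-- A's paren loop: state (paren_depth, max_paren_depth)
def pvAParenStep (st : Int × Int) (c : Char) : Int × Int :=
  if c = '(' then (st.1 + 1, max st.2 (st.1 + 1))
  else if c = ')' then (max (st.1 - 1) 0, st.2)
  else st

def extract_formula_features_py (formula : String) : List (String × Int) :=
  let cleaned := PySem.Str.upper (PySem.Str.replace formula " " "")
  let st := cleaned.toList.foldl pvAParenStep (0, 0)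
  [("token_length", (PySem.Str.len cleaned : Int)),
   ("count_X", (PySem.Str.count cleaned "X" : Int)),
   ("count_F", (PySem.Str.count cleaned "F" : Int)),
   ("count_G", (PySem.Str.count cleaned "G" : Int)),
   ("count_U", (PySem.Str.count cleaned "U" : Int)),
   ("count_R", (PySem.Str.count cleaned "R" : Int)),
   ("coalition_markers", (PySem.Str.count cleaned "<" : Int)),
   ("max_paren_depth", st.2)]

-- ===== PORT B =====
-- B's single-pass state: (n_x, n_f, n_g, n_u, n_r, n_coal, depth, max_depth)
def pvBStep (st : Int × Int × Int × Int × Int × Int × Int × Int) (c : Char) :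
    Int × Int × Int × Int × Int × Int × Int × Int :=
  match st with
  | (x, f, g, u, r, co, d, m) =>
    if c = 'X' then (x + 1, f, g, u, r, co, d, m)
    else if c = 'F' then (x, f + 1, g, u, r, co, d, m)
    else if c = 'G' then (x, f, g + 1, u, r, co, d, m)
    else if c = 'U' then (x, f, g, u + 1, r, co, d, m)
    else if c = 'R' then (x, f, g, u, r + 1, co, d, m)
    else if c = '<' then (x, f, g, u, r, co + 1, d, m)
    else if c = '(' then (x, f, g, u, r, co, d + 1, if d + 1 > m then d + 1 else m)
    else if c = ')' then (x, f, g, u, r, co, if d > 0 then d - 1 else 0, m)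
    else st

def extract_formula_features_py_alt (formula : String) : List (String × Int) :=
  let cleaned := PySem.Str.upper (PySem.Str.replace formula " " "")
  match cleaned.toList.foldl pvBStep (0, 0, 0, 0, 0, 0, 0, 0) with
  | (x, f, g, u, r, co, _, m) =>
    [("token_length", (PySem.Str.len cleaned : Int)),
     ("count_X", x), ("count_F", f), ("count_G", g),
     ("count_U", u), ("count_R", r), ("coalition_markers", co),
     ("max_paren_depth", m)]

-- ===== PRECONDITION & SPEC =====
def Spec_extract_formula_features_py (formula : String) (out : List (String × Int)) : Prop := out = extract_formula_features_py_alt formula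
instance (formula : String) (out : List (String × Int)) : Decidable (Spec_extract_formula_features_py formula out) := by unfold Spec_extract_formula_features_py; infer_instance

-- ===== CLAIM (what is proved, stated in full; the proofs are below) =====
def Claim_equal_extract_formula_features_py : Prop := ∀ (formula : String), Dom_extract_formula_features_py formula → Spec_extract_formula_features_py formula (extract_formula_features_py formula)

-- ===== LEMMAS AND PROOFS =====

-- counting a single-character substring is counting that character
lemma count_go_singleton (v : Char) :
    ∀ (l : List Char) (fuel acc : Nat), l.length ≤ fuel →
      PySem.Chars.count.go [v] fuel l acc = acc + l.count v := by
  intro l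
  induction l with
  | nil => intro fuel acc _; cases fuel <;> simp [PySem.Chars.count.go]
  | cons h t ih =>
    intro fuel acc hle
    cases fuel with
    | zero => simp at hle
    | succ n =>
      by_cases hv : h = v
      · subst hv
        rw [PySem.Chars.count.go]
        simp only [List.isPrefixOf, BEq.rfl, Bool.true_and,
          if_true, List.length_singleton, List.drop_one, List.tail_cons]
        rw [ih n (acc + 1) (by simpa using hle)]
        simp
        omega
      · rw [PySem.Chars.count.go]
        have : ([v].isPrefixOf (h :: t)) = false := by
          simp [List.isPrefixOf]
          exact fun hvh => (hv hvh.symm).elim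
        rw [this]
        simp only [if_false, Bool.false_eq_true]
        rw [ih n acc (by simpa using hle)]
        simp [hv]

lemma count_singleton (s : List Char) (v : Char) :
    PySem.Chars.count s [v] = s.count v := by
  simp [PySem.Chars.count]
  have := count_go_singleton v s s.length 0 le_rfl
  omega

-- the single-pass fold computes all six counts plus A's paren fold
lemma fold_invariant :
    ∀ (l : List Char) (x f g u r co d m : Int),
      l.foldl pvBStep (x, f, g, u, r, co, d, m) =
        (x + l.count 'X', f + l.count 'F', g + l.count 'G', u + l.count 'U',
         r + l.count 'R', co + l.count '<',
         (l.foldl pvAParenStep (d, m)).1, (l.foldl pvAParenStep (d, m)).2) := by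
  intro l
  induction l with
  | nil => intro x f g u r co d m; simp
  | cons c t ih =>
    intro x f g u r co d m
    simp only [List.foldl_cons, pvBStep]
    split_ifs with h1 h2 h3 h4 h5 h6 h7 h8 <;>
      rw [ih] <;>
      (try simp_all [pvAParenStep, Prod.mk.injEq, max_def]) <;>
      (try omega) <;>
      (try (split_ifs <;> simp_all <;> omega)) <;>
      (try (have hd : (if d ≤ 1 then (0 : Int) else d - 1) = d - 1 := by omega
            rw [hd]))

-- ===== VERDICT (by name: the statement is the Claim_ definition above) =====
theorem extract_formula_features_py_spec : Claim_equal_extract_formula_features_py := by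
  intro formula _
  unfold Spec_extract_formula_features_py extract_formula_features_py extract_formula_features_py_alt
  simp only [PySem.Str.count_eq]
  rw [fold_invariant]
  simp [count_singleton]
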